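-- pv_equiv track=rewrite | github.com/hayeongKo/baekjoon_python | 프로그래머스/1/135808. 과일 장수/과일 장수.py | solution
-- ===== SOURCE A (Python) =====
-- def solution(k, m, score):
--     answer = 0
--     score.sort(reverse=True)
--     temp = []
--     for i in score:
--         temp.append(i)
--         if len(temp) == m:
--             answer += min(temp) * m
--             temp = []
--     return answer
-- ===== SOURCE B (Python) =====
-- def solution(k, m, score):
--     # Sorts score in place (same observable mutation as the original).
--     # After a descending sort, the minimum of each full group of m is the
--     # element at index m-1, 2m-1, ...: sum those directly instead of
--     # collecting each group and scanning it for its minimum.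
--     score.sort(reverse=True)
--     if m <= 0:
--         return 0
--     total = 0
--     for i in range(m - 1, len(score), m):
--         total += score[i]
--     return total * m
-- ===== Notes on version B (the rewrite author's own statement) =====
-- stated objective: simpler
-- what changed: Instead of collecting each group of m into a temp list and rescanning it with min(), B uses that after the descending sort the minimum of each full group sits at indices m-1, 2m-1, ..., and sums those positions directly with a strided range, multiplying by m once at the end.
import Mathlib
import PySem

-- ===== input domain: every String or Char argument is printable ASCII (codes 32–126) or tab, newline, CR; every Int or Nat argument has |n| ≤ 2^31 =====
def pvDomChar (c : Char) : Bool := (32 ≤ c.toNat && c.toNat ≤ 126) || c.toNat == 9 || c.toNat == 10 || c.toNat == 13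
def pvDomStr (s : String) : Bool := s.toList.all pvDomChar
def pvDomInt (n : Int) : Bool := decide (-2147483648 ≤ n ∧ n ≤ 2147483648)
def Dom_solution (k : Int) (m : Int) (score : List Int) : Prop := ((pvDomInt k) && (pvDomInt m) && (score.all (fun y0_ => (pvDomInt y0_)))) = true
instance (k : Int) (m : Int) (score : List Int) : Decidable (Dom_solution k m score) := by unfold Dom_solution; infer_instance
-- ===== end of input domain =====

-- B sums the group minima (at strided indices of the descending sort) directly instead of
-- collecting and rescanning each group; equivalence is about the return value (both Pythons
-- sort `score` in place, the same observable mutation).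

-- ===== PORT A =====
def solutionStep (m : Int) (st : Int × List Int) (i : Int) : Int × List Int :=
  let temp := st.2 ++ [i]
  if PySem.List.len temp = m then
    (st.1 + (PySem.List.min? temp (fun x => x)).getD 0 * m, [])
  else
    (st.1, temp)

def solution (k : Int) (m : Int) (score : List Int) : Int :=
  ((PySem.List.sorted score (fun x => x) true).foldl (solutionStep m) (0, [])).1

-- ===== PORT B =====
def solution_alt (k : Int) (m : Int) (score : List Int) : Int :=
  let s := PySem.List.sorted score (fun x => x) true
  if m ≤ 0 then 0
  else
    ((PySem.List.pyRange (m - 1) (PySem.List.len s) m).foldl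
      (fun total i => total + PySem.List.pyGetD s i 0) 0) * m

-- ===== PRECONDITION & SPEC =====
def Spec_solution (k : Int) (m : Int) (score : List Int) (out : Int) : Prop := out = solution_alt k m score
instance (k : Int) (m : Int) (score : List Int) (out : Int) : Decidable (Spec_solution k m score out) := by unfold Spec_solution; infer_instance

-- ===== CLAIM (what is proved, stated in full; the proofs are below) =====
def Claim_equal_solution : Prop := ∀ (k : Int) (m : Int) (score : List Int), Dom_solution k m score → Spec_solution k m score (solution k m score)

-- ===== LEMMAS AND PROOFS =====

-- sum of the minima of the successive full groups of m of l (the common value of both loops)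
def gmins (m : Int) (l : List Int) : Int :=
  if h : 0 < m ∧ m ≤ PySem.List.len l then
    PySem.List.pyGetD l (m - 1) 0 + gmins m (l.drop m.toNat)
  else 0
termination_by l.length
decreasing_by
  simp only [PySem.List.len_eq] at h
  have h1 : 1 ≤ m.toNat := by omega
  have h2 : m.toNat ≤ l.length := by omega
  simp [List.length_drop]; omega

theorem foldA_nonpos (m : Int) (hm : m ≤ 0) (l : List Int) :
    ∀ (ans : Int) (temp : List Int),
      (l.foldl (solutionStep m) (ans, temp)).1 = ans := by
  induction l with
  | nil => intro ans temp; rfl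
  | cons x t ih =>
    intro ans temp
    have hcond : ¬ (PySem.List.len (temp ++ [x]) = m) := by
      simp [PySem.List.len_eq]; omega
    simp only [List.foldl_cons, solutionStep, if_neg hcond]
    exact ih ans (temp ++ [x])

theorem pairwise_last_min (l : List Int) (h : l.Pairwise (fun a b => b ≤ a)) (hne : l ≠ []) :
    ∀ x ∈ l, l.getLast hne ≤ x := by
  induction l with
  | nil => exact absurd rfl hne
  | cons a t ih =>
    intro x hx
    rcases List.pairwise_cons.mp h with ⟨ha, ht⟩
    cases t with
    | nil =>
      simp at hx
      simp [hx]
    | cons b t' =>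
      have hne' : (b :: t') ≠ [] := by simp
      rw [List.getLast_cons hne']
      rcases List.mem_cons.mp hx with rfl | hx'
      · exact ha _ (List.getLast_mem hne')
      · exact ih ht hne' x hx'

theorem foldA_eq_gmins (m : Int) (hm : 1 ≤ m) (l : List Int) :
    ∀ (temp : List Int) (ans : Int),
      (temp.length : Int) < m →
      (temp ++ l).Pairwise (fun a b => b ≤ a) →
      (l.foldl (solutionStep m) (ans, temp)).1 = ans + gmins m (temp ++ l) * m := by
  induction l with
  | nil =>
    intro temp ans hlt _
    rw [gmins, dif_neg (by simp [PySem.List.len_eq]; omega)]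
    simp
  | cons i rest ih =>
    intro temp ans hlt hpw
    have hassoc : temp ++ i :: rest = (temp ++ [i]) ++ rest := by simp
    by_cases hc : PySem.List.len (temp ++ [i]) = m
    · have hlen : (temp.length : Int) + 1 = m := by
        simpa [PySem.List.len_eq] using hc
      have hlenN : (temp ++ [i]).length = m.toNat := by
        simp
        omega
      have hpw' : ((temp ++ [i]) ++ rest).Pairwise (fun a b => b ≤ a) := by
        rw [← hassoc]; exact hpw
      have hpwg := (List.pairwise_append.mp hpw').1
      have hpwr := (List.pairwise_append.mp hpw').2.1
      have hne : temp ++ [i] ≠ [] := by simp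
      obtain ⟨v, hv⟩ : ∃ v, PySem.List.min? (temp ++ [i]) (fun x => x) = some v := by
        cases hmin : PySem.List.min? (temp ++ [i]) (fun x => x) with
        | none => exact absurd ((PySem.List.min?_eq_none_iff _ _).mp hmin) hne
        | some v => exact ⟨v, rfl⟩
      have hvlast : v = (temp ++ [i]).getLast hne := by
        apply le_antisymm
        · exact PySem.List.min?_isMin hv _ (List.getLast_mem hne)
        · exact pairwise_last_min _ hpwg hne v (PySem.List.min?_mem hv)
      have hget : PySem.List.pyGetD ((temp ++ [i]) ++ rest) (m - 1) 0
          = (temp ++ [i]).getLast hne := by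
        rw [PySem.List.pyGetD_eq_getElem _ _ (by omega)
            (by simp; omega)]
        rw [List.getElem_append_left (by simp; omega)]
        rw [List.getLast_eq_getElem]
        congr 1
        omega
      have hdrop : (((temp ++ [i]) ++ rest).drop m.toNat) = rest := by
        rw [← hlenN, List.drop_left]
      have hg : gmins m ((temp ++ [i]) ++ rest) = v + gmins m rest := by
        rw [gmins, dif_pos ⟨by omega,
          by simp [PySem.List.len_eq]; omega⟩]
        rw [hdrop, hget, ← hvlast]
      simp only [List.foldl_cons, solutionStep, if_pos hc, hv, Option.getD_some]
      rw [ih [] (ans + v * m) (by simpa using hm) (by simpa using hpwr)]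
      rw [hassoc, hg]
      simp only [List.nil_append]
      ring
    · have hlen : ((temp ++ [i]).length : Int) < m := by
        simp only [PySem.List.len_eq, List.length_append, List.length_cons,
          List.length_nil] at hc ⊢
        push_cast at hc ⊢
        omega
      simp only [List.foldl_cons, solutionStep, if_neg hc]
      rw [ih (temp ++ [i]) ans hlen (by rw [← hassoc]; exact hpw), hassoc]

theorem pyRange_stride (m : Int) (hm : 1 ≤ m) (n : Nat) :
    PySem.List.pyRange (m - 1) (n : Int) m =
      (List.range (((n : Int) / m).toNat)).map (fun k : Nat => (m - 1) + m * (k : Int)) := by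
  rw [PySem.List.pyRange_of_pos _ _ (by omega)]
  congr 1
  split_ifs with h
  · have heq : (n : Int) - (m - 1) + m - 1 = n := by ring
    rw [heq]
  · have h0 : (n : Int) / m = 0 := Int.ediv_eq_zero_of_lt (by omega) (by omega)
    simp [h0]

theorem pyGetD_drop_add (l : List Int) (d : Nat) (j : Int) (hj : 0 ≤ j) :
    PySem.List.pyGetD (l.drop d) j 0 = PySem.List.pyGetD l ((d : Int) + j) 0 := by
  have h1 : j = ((j.toNat : Nat) : Int) := (Int.toNat_of_nonneg hj).symm
  rw [h1, PySem.List.pyGetD_natCast]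
  have h2 : (d : Int) + ((j.toNat : Nat) : Int) = ((d + j.toNat : Nat) : Int) := by
    push_cast; ring
  rw [h2, PySem.List.pyGetD_natCast]
  simp [List.getD_eq_getElem?_getD, List.getElem?_drop]

theorem sum_stride_eq_gmins (m : Int) (hm : 1 ≤ m) (n : Nat) :
    ∀ (l : List Int), l.length = n →
      ((List.range (((l.length : Int) / m).toNat)).map
        (fun k : Nat => PySem.List.pyGetD l ((m - 1) + m * (k : Int)) 0)).sum = gmins m l := by
  induction n using Nat.strong_induction_on with
  | _ n ih =>
    intro l hl
    by_cases hbig : m ≤ (l.length : Int)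
    · have hdiv1 : 1 ≤ (l.length : Int) / m := by
        rw [Int.le_ediv_iff_mul_le (by omega)]; omega
      have hdroplen : (l.drop m.toNat).length = l.length - m.toNat := by simp
      have hdivdrop : ((l.drop m.toNat).length : Int) / m = (l.length : Int) / m - 1 := by
        have hcast : ((l.drop m.toNat).length : Int) = (l.length : Int) + (-1) * m := by
          rw [hdroplen]; omega
        rw [hcast, Int.add_mul_ediv_right _ _ (by omega : m ≠ 0)]
        omega
      obtain ⟨c, hc⟩ : ∃ c, ((l.length : Int) / m).toNat = c + 1 :=
        ⟨((l.length : Int) / m).toNat - 1, by omega⟩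
      rw [hc, List.range_succ_eq_map, List.map_cons, List.sum_cons, List.map_map]
      have htail : ∀ k : Nat,
          ((fun k : Nat => PySem.List.pyGetD l ((m - 1) + m * (k : Int)) 0) ∘ Nat.succ) k
            = PySem.List.pyGetD (l.drop m.toNat) ((m - 1) + m * (k : Int)) 0 := by
        intro k
        have hmk : (0 : Int) ≤ m * (k : Int) := mul_nonneg (by omega) (Int.natCast_nonneg k)
        rw [Function.comp_apply, pyGetD_drop_add l m.toNat _ (by omega)]
        congr 1
        have hmm : (m.toNat : Int) = m := by omega
        rw [hmm]
        push_cast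
        ring
      rw [List.map_congr_left (fun k _ => htail k)]
      have hcc : (((l.drop m.toNat).length : Int) / m).toNat = c := by omega
      have hIH := ih (l.drop m.toNat).length (by simp; omega) (l.drop m.toNat) rfl
      rw [hcc] at hIH
      rw [hIH]
      have hgl : gmins m l = PySem.List.pyGetD l (m - 1) 0 + gmins m (l.drop m.toNat) := by
        rw [gmins, dif_pos ⟨by omega, by simp only [PySem.List.len_eq]; omega⟩]
      rw [hgl]
      norm_num
    · have h0 : (l.length : Int) / m = 0 := Int.ediv_eq_zero_of_lt (by omega) (by omega)
      rw [gmins, dif_neg (by simp only [PySem.List.len_eq]; omega)]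
      simp [h0]

theorem foldB_eq_gmins (m : Int) (hm : 1 ≤ m) (l : List Int) :
    (PySem.List.pyRange (m - 1) (PySem.List.len l) m).foldl
      (fun total i => total + PySem.List.pyGetD l i 0) 0 = gmins m l := by
  rw [PySem.List.len_eq, pyRange_stride m hm l.length, PySem.List.foldl_add, List.map_map]
  simp only [Function.comp_def]
  rw [sum_stride_eq_gmins m hm l.length l rfl]
  ring

-- ===== VERDICT (by name: the statement is the Claim_ definition above) =====
theorem solution_spec : Claim_equal_solution := by
  intro k m score _
  unfold Spec_solution solution solution_alt
  by_cases hm : m ≤ 0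
  · simp only [if_pos hm]
    exact foldA_nonpos m hm _ 0 []
  · have hm1 : 1 ≤ m := by omega
    simp only [if_neg hm]
    rw [foldB_eq_gmins m hm1, foldA_eq_gmins m hm1 _ [] 0 (by simpa using hm1)
      (by simpa using PySem.List.sorted_pairwise_rev score (fun x => x))]
    simp
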